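-- pv_equiv track=rewrite | github.com/adilanyan/IS211_Assignment13 | IS211_Assignment13.py | compareTo
-- ===== SOURCE A (Python) =====
-- def compareTo(string1, string2):
--     if not string1 and not string2:
--         return 0
--     elif not string1:
--         return -1
--     elif not string2:
--         return 1
--     else:
--         return compareTo(string1[1:], string2[1:])
-- ===== SOURCE B (Python) =====
-- def compareTo(string1, string2):
--     a, b = len(string1), len(string2)
--     if a < b:
--         return -1
--     if a > b:
--         return 1
--     return 0
-- ===== Notes on version B (the rewrite author's own statement) =====
-- stated objective: faster
-- what changed: Replaced the recursive simultaneous tail-stripping (which builds a new slice of each string at every step) with a direct comparison of the two lengths returning the sign.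
import Mathlib
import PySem

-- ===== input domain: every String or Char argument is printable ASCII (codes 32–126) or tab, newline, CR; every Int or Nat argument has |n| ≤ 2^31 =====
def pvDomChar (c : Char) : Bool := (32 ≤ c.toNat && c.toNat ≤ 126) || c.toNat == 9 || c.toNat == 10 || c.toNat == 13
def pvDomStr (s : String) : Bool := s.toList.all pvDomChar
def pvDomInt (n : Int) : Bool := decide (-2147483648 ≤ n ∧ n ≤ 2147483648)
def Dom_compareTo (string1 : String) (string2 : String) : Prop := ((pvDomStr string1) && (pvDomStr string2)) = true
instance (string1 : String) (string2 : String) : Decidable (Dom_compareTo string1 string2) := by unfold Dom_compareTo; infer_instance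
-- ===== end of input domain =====

-- B replaces A's recursive tail-stripping with a direct sign comparison of the two lengths (faster).

-- ===== PORT A =====
-- A recurses on string1[1:], string2[1:]; ported as structural recursion on the char lists
-- (s[1:] = tail; 'not s' = the list is empty).
def compareToGo : List Char → List Char → Int
  | [], [] => 0
  | [], _ :: _ => -1
  | _ :: _, [] => 1
  | _ :: t1, _ :: t2 => compareToGo t1 t2

def compareTo (string1 : String) (string2 : String) : Int :=
  compareToGo string1.toList string2.toList

-- ===== PORT B =====
def compareTo_alt (string1 : String) (string2 : String) : Int :=
  let a : Int := PySem.Str.len string1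
  let b : Int := PySem.Str.len string2
  if a < b then -1 else if a > b then 1 else 0

-- ===== PRECONDITION & SPEC =====
def Spec_compareTo (string1 : String) (string2 : String) (out : Int) : Prop := out = compareTo_alt string1 string2
instance (string1 : String) (string2 : String) (out : Int) : Decidable (Spec_compareTo string1 string2 out) := by unfold Spec_compareTo; infer_instance

-- ===== CLAIM =====
def Claim_equal_compareTo : Prop := ∀ (string1 : String) (string2 : String), Dom_compareTo string1 string2 → Spec_compareTo string1 string2 (compareTo string1 string2)

-- ===== LEMMAS AND PROOFS =====
theorem compareToGo_eq (l1 l2 : List Char) :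
    compareToGo l1 l2 =
      if (l1.length : Int) < l2.length then -1 else if (l1.length : Int) > l2.length then 1 else 0 := by
  induction l1 generalizing l2 with
  | nil => cases l2 <;> simp [compareToGo]
  | cons h t ih =>
    cases l2 with
    | nil => simp [compareToGo]; positivity
    | cons h2 t2 =>
      simp only [compareToGo, ih, List.length_cons]
      push_cast
      by_cases hlt : (t.length : Int) < t2.length <;> by_cases hgt : (t.length : Int) > t2.length <;>
        simp_all

-- ===== VERDICT =====
theorem compareTo_spec : Claim_equal_compareTo := by
  intro s1 s2 _
  unfold Spec_compareTo compareTo compareTo_alt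
  rw [compareToGo_eq]
  simp [PySem.Str.len]
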